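-- pv_equiv track=rewrite | github.com/quotient42/pyGCAP | src/_parse.py | _split_into_regions
-- ===== SOURCE A (Python) =====
-- def _split_into_regions(lines):
--     split_regions = []
--     cur_region = ""
--
--     for line in lines:
--         line = line.strip(' ')
--         if line.startswith("gene  "):
--             if cur_region:
--                 split_regions.append(cur_region)
--             cur_region = line
--         else:
--             cur_region += line
--
--     if cur_region:
--         split_regions.append(cur_region)
--
--     return split_regions[1:]
-- ===== SOURCE B (Python) =====
-- def _split_into_regions(lines):
--     stripped = [l.strip(' ') for l in lines]
--
--     def span(seq):
--         """(lines before the first "gene  " marker, remainder starting at it)."""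
--         for k, s in enumerate(seq):
--             if s.startswith("gene  "):
--                 return seq[:k], seq[k:]
--         return seq, []
--
--     pre, rest = span(stripped)
--     regions = []
--     preamble = ''.join(pre)
--     if preamble:
--         regions.append(preamble)
--     while rest:
--         head, tail = rest[0], rest[1:]
--         body, rest = span(tail)
--         regions.append(head + ''.join(body))
--     return regions[1:]
-- ===== Notes on version B (the rewrite author's own statement) =====
-- stated objective: alternative
-- what changed: Replaces the single running-accumulator loop (building one region string incrementally and flushing at each marker) by a span decomposition: repeatedly split the stripped lines at the next 'gene ' marker and join each whole segment at once.
import Mathlib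
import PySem

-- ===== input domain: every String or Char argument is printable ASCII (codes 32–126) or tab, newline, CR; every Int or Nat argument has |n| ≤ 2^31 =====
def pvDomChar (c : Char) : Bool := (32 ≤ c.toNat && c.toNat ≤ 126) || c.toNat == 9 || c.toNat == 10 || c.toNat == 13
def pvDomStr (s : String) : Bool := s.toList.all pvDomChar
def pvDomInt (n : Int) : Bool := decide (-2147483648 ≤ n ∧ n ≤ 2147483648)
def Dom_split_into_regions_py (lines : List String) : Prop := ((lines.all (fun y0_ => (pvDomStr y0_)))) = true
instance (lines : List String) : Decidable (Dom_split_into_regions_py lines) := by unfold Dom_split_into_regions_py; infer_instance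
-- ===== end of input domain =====

-- B replaces A's running-accumulator loop by a span decomposition (split the stripped lines at each "gene  " marker, join each segment at once); alternative structure, same cost.

-- ===== PORT A =====
def split_into_regions_py (lines : List String) : List String :=
  let st := lines.foldl (fun (st : List String × String) line =>
      let l := PySem.Str.stripChars line " "
      if PySem.Str.startswith l "gene  " then
        ((if st.2 ≠ "" then st.1 ++ [st.2] else st.1), l)
      else
        (st.1, st.2 ++ l)) ([], "")
  let regions := if st.2 ≠ "" then st.1 ++ [st.2] else st.1
  PySem.List.slice regions (some 1) none

-- ===== PORT B =====
-- span(seq): lines before the first "gene  " marker, and the remainder starting at it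
def pvSpan : List String → (List String × List String)
  | [] => ([], [])
  | s :: t =>
    if PySem.Str.startswith s "gene  " then ([], s :: t)
    else
      let p := pvSpan t
      (s :: p.1, p.2)

theorem pvSpan_snd_length : ∀ (seq : List String), (pvSpan seq).2.length ≤ seq.length
  | [] => Nat.le_refl _
  | s :: t => by
    simp only [pvSpan]
    split
    · simp
    · exact Nat.le_trans (pvSpan_snd_length t) (Nat.le_succ _)

-- the while-loop of Source B, carrying the regions list built so far
def pvLoop (regions : List String) : List String → List String
  | [] => regions
  | head :: tail =>
    let p := pvSpan tail
    pvLoop (regions ++ [head ++ PySem.Str.join "" p.1]) p.2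
termination_by rest => rest.length
decreasing_by
  exact Nat.lt_succ_of_le (pvSpan_snd_length tail)

def split_into_regions_py_alt (lines : List String) : List String :=
  let stripped := lines.map (fun l => PySem.Str.stripChars l " ")
  let p := pvSpan stripped
  let preamble := PySem.Str.join "" p.1
  let regions := if preamble ≠ "" then [preamble] else []
  PySem.List.slice (pvLoop regions p.2) (some 1) none

-- ===== PRECONDITION & SPEC =====
def Spec_split_into_regions_py (lines : List String) (out : List String) : Prop := out = split_into_regions_py_alt lines
instance (lines : List String) (out : List String) : Decidable (Spec_split_into_regions_py lines out) := by unfold Spec_split_into_regions_py; infer_instance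

-- ===== CLAIM (what is proved, stated in full; the proofs are below) =====
def Claim_equal_split_into_regions_py : Prop := ∀ (lines : List String), Dom_split_into_regions_py lines → Spec_split_into_regions_py lines (split_into_regions_py lines)

-- ===== LEMMAS AND PROOFS =====

-- A's loop body and final flush, named so the fold can be reasoned about
def pvStep (st : List String × String) (l : String) : List String × String :=
  if PySem.Str.startswith l "gene  " then
    ((if st.2 ≠ "" then st.1 ++ [st.2] else st.1), l)
  else (st.1, st.2 ++ l)

def pvFin (st : List String × String) : List String :=
  if st.2 ≠ "" then st.1 ++ [st.2] else st.1

-- A's loop, written as structural recursion over the already-stripped lines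
def pvGo : List String → String → List String
  | [], cur => if cur ≠ "" then [cur] else []
  | s :: t, cur =>
    if PySem.Str.startswith s "gene  " then
      (if cur ≠ "" then [cur] else []) ++ pvGo t s
    else
      pvGo t (cur ++ s)

-- the regions produced from a remainder that starts at a marker (or is empty)
def pvRegions : List String → List String
  | [] => []
  | h :: t =>
    let p := pvSpan t
    (h ++ PySem.Str.join "" p.1) :: pvRegions p.2
termination_by rest => rest.length
decreasing_by
  exact Nat.lt_succ_of_le (pvSpan_snd_length t)

theorem pvJoin_cons (s : String) (rest : List String) :
    PySem.Str.join "" (s :: rest) = s ++ PySem.Str.join "" rest := by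
  cases rest with
  | nil => simp [PySem.Str.join]
  | cons b t => simp [PySem.Str.join, PySem.Chars.join_cons_cons]

theorem pvMark_ne_empty {s : String} (h : PySem.Str.startswith s "gene  " = true) : s ≠ "" := by
  intro he; subst he; exact absurd h (by decide)

theorem pvAppend_ne_empty_left {a b : String} (h : a ≠ "") : a ++ b ≠ "" := by
  intro he
  apply h
  have := congrArg String.toList he
  simp at this
  cases this.1
  rfl

theorem pvL1 : ∀ (S : List String) (acc : List String) (cur : String),
    pvFin (S.foldl pvStep (acc, cur)) = acc ++ pvGo S cur := by
  intro S
  induction S with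
  | nil => intro acc cur; simp [pvFin, pvGo]; by_cases h : cur = "" <;> simp [h]
  | cons s t ih =>
    intro acc cur
    rw [List.foldl_cons, pvGo]
    by_cases hm : PySem.Str.startswith s "gene  " = true
    · have hs : pvStep (acc, cur) s = (acc ++ (if cur ≠ "" then [cur] else []), s) := by
        simp only [pvStep]
        rw [if_pos hm]
        by_cases hc : cur = "" <;> simp [hc]
      rw [hs, if_pos hm, ih, List.append_assoc]
    · have hs : pvStep (acc, cur) s = (acc, cur ++ s) := by
        simp only [pvStep]
        rw [if_neg hm]
      rw [hs, if_neg hm, ih]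

theorem pvL3 : ∀ (rest regions : List String), pvLoop regions rest = regions ++ pvRegions rest := by
  intro rest
  induction rest using pvRegions.induct with
  | case1 => intro regions; simp [pvLoop, pvRegions]
  | case2 h t p ih =>
    intro regions
    rw [pvLoop, pvRegions]
    rw [ih, List.append_assoc]
    rfl

theorem pvL2 : ∀ (S : List String) (cur : String),
    pvGo S cur =
      (if cur ++ PySem.Str.join "" (pvSpan S).1 ≠ "" then [cur ++ PySem.Str.join "" (pvSpan S).1] else [])
        ++ pvRegions (pvSpan S).2 := by
  intro S
  induction S with
  | nil =>
    intro cur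
    simp only [pvGo, pvSpan, pvRegions]
    have : PySem.Str.join "" ([] : List String) = "" := by simp [PySem.Str.join]
    rw [this]
    simp
  | cons s t ih =>
    intro cur
    by_cases hm : PySem.Str.startswith s "gene  " = true
    · rw [pvGo, if_pos hm, ih s]
      have hspan : pvSpan (s :: t) = ([], s :: t) := by rw [pvSpan, if_pos hm]
      rw [hspan]
      have hj : PySem.Str.join "" ([] : List String) = "" := by simp [PySem.Str.join]
      simp only [hj]
      have hne : s ++ PySem.Str.join "" (pvSpan t).1 ≠ "" :=
        pvAppend_ne_empty_left (pvMark_ne_empty hm)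
      rw [if_pos hne, pvRegions]
      simp
    · rw [pvGo, if_neg hm, ih (cur ++ s)]
      have hspan : pvSpan (s :: t) = (s :: (pvSpan t).1, (pvSpan t).2) := by
        rw [pvSpan, if_neg hm]
      rw [hspan]
      simp only [pvJoin_cons, String.append_assoc]

-- ===== VERDICT (by name: the statement is the Claim_ definition above) =====
theorem split_into_regions_py_spec : Claim_equal_split_into_regions_py := by
  intro lines _
  show split_into_regions_py lines = split_into_regions_py_alt lines
  unfold split_into_regions_py split_into_regions_py_alt
  simp only []
  have hfold :
      lines.foldl (fun (st : List String × String) line =>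
        let l := PySem.Str.stripChars line " "
        if PySem.Str.startswith l "gene  " then
          ((if st.2 ≠ "" then st.1 ++ [st.2] else st.1), l)
        else (st.1, st.2 ++ l)) ([], "")
      = (lines.map (fun l => PySem.Str.stripChars l " ")).foldl pvStep ([], "") := by
    rw [List.foldl_map]
    rfl
  rw [hfold]
  have hA := pvL1 (lines.map (fun l => PySem.Str.stripChars l " ")) [] ""
  simp only [pvFin] at hA
  rw [hA]
  rw [pvL3]
  rw [pvL2 (lines.map (fun l => PySem.Str.stripChars l " ")) ""]
  have : ("" : String) ++ PySem.Str.join "" (pvSpan (lines.map (fun l => PySem.Str.stripChars l " "))).1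
      = PySem.Str.join "" (pvSpan (lines.map (fun l => PySem.Str.stripChars l " "))).1 := by simp
  rw [this]
  rw [List.nil_append]
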